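-- pv_equiv track=rewrite | github.com/LiangLiheng/LeetCodePro | 3630.partition-array-for-maximum-xor-and-and.py | maximizeXorAndXor
-- ===== SOURCE A (Python) =====
-- from typing import List
--
-- def maximizeXorAndXor(nums: List[int]) -> int:
--     def insert(basis, val):
--         for j in range(31, -1, -1):
--             if (val & (1 << j)) == 0:
--                 continue
--             if basis[j]:
--                 val ^= basis[j]
--             else:
--                 basis[j] = val
--                 return
--     def greedy(basis, mask):
--         res = 0
--         for j in range(31, -1, -1):
--             if (mask & (1 << j)) and basis[j] and (res & (1 << j)) == 0:
--                 res ^= basis[j]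
--         return res & mask
--     n = len(nums)
--     ans = 0
--     ALL = (1 << 32) - 1
--     for bmask in range(1 << n):
--         and_b = ALL
--         empty_b = True
--         for i in range(n):
--             if bmask & (1 << i):
--                 if empty_b:
--                     and_b = nums[i]
--                     empty_b = False
--                 else:
--                     and_b &= nums[i]
--         if empty_b:
--             and_b = 0
--         tx = 0
--         basis = [0] * 32
--         for i in range(n):
--             if (bmask & (1 << i)) == 0:
--                 tx ^= nums[i]
--                 insert(basis, nums[i])
--         m = (~tx) & ALL
--         max_and = greedy(basis, m)
--         val = tx + 2 * max_and + and_b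
--         if val > ans:
--             ans = val
--     return ans
-- ===== SOURCE B (Python) =====
-- from typing import List
--
-- def maximizeXorAndXor(nums: List[int]) -> int:
--     ALL = (1 << 32) - 1
--
--     def insert(basis, val):
--         for j in range(31, -1, -1):
--             if (val & (1 << j)) == 0:
--                 continue
--             if basis[j]:
--                 val ^= basis[j]
--             else:
--                 basis[j] = val
--                 return
--
--     def greedy(basis, mask):
--         res = 0
--         for j in range(31, -1, -1):
--             if (mask & (1 << j)) and basis[j] and (res & (1 << j)) == 0:
--                 res ^= basis[j]
--         return res & mask
--
--     def rec(xs, and_b, empty_b, tx, basis, ans):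
--         if not xs:
--             ab = 0 if empty_b else and_b
--             m = (~tx) & ALL
--             val = tx + 2 * greedy(basis, m) + ab
--             return val if val > ans else ans
--         x = xs[0]
--         rest = xs[1:]
--         ans = rec(rest, x if empty_b else and_b & x, False, tx, basis, ans)
--         b2 = basis.copy()
--         insert(b2, x)
--         return rec(rest, and_b, empty_b, tx ^ x, b2, ans)
--
--     return rec(nums, ALL, True, 0, [0] * 32, 0)
-- ===== Notes on version B (the rewrite author's own statement) =====
-- stated objective: alternative
-- what changed: Replaces the for-bmask-in-range(1<<n) enumeration (which rebuilds the AND accumulator and the whole XOR basis from scratch for every bitmask) by a recursion that branches each element into the B-set or the complement, carrying (and_b, tx, basis) down the subset tree so the basis is extended incrementally (one insert per node) instead of rebuilt per subset; both remain exponential in n, so no speed claim is made.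
import Mathlib
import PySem

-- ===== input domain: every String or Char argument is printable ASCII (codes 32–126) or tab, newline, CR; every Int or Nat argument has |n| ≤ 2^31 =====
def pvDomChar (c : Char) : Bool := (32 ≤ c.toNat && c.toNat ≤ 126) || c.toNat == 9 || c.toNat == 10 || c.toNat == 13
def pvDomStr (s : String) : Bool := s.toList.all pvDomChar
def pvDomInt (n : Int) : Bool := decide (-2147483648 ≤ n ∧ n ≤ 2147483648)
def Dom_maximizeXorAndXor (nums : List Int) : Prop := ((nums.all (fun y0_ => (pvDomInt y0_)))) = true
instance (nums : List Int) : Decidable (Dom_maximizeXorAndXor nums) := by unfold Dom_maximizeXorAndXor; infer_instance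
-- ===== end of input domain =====

-- B replaces the 2^n bitmask enumeration by a branching recursion that carries (and_b, tx, basis)
-- down the subset tree, building the XOR basis incrementally instead of rebuilding it per subset.

-- ===== PORT A =====
-- helper `insert(basis, val)`: early return modelled by a `done` flag in the fold state
-- (shift amounts i.toNat are loop indices from range(...), always ≥ 0, so toNat is exact)
def pvInsert (basis : List Int) (v : Int) : List Int :=
  ((PySem.List.pyRange 31 (-1) (-1)).foldl (fun st j =>
    if st.2.2 then st
    else if PySem.Int.band st.2.1 ((1:Int) <<< j.toNat) = 0 then st
    else if PySem.List.pyGetD st.1 j 0 ≠ 0 then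
      (st.1, PySem.Int.bxor st.2.1 (PySem.List.pyGetD st.1 j 0), false)
    else (PySem.List.pySetD st.1 j st.2.1, st.2.1, true))
    (basis, v, false)).1

-- helper `greedy(basis, mask)`
def pvGreedy (basis : List Int) (mask : Int) : Int :=
  let res := (PySem.List.pyRange 31 (-1) (-1)).foldl (fun res j =>
    if PySem.Int.band mask ((1:Int) <<< j.toNat) ≠ 0 ∧ PySem.List.pyGetD basis j 0 ≠ 0 ∧
        PySem.Int.band res ((1:Int) <<< j.toNat) = 0
    then PySem.Int.bxor res (PySem.List.pyGetD basis j 0) else res) 0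
  PySem.Int.band res mask

def maximizeXorAndXor (nums : List Int) : Int :=
  let n : Int := (nums.length : Int)
  let ALL : Int := ((1:Int) <<< 32) - 1
  (PySem.List.pyRange 0 ((1:Int) <<< nums.length) 1).foldl (fun ans bmask =>
    let abe := (PySem.List.pyRange 0 n 1).foldl (fun p i =>
      if PySem.Int.band bmask ((1:Int) <<< i.toNat) ≠ 0 then
        if p.2 then (PySem.List.pyGetD nums i 0, false)
        else (PySem.Int.band p.1 (PySem.List.pyGetD nums i 0), false)
      else p) (ALL, true)
    let and_b : Int := if abe.2 then 0 else abe.1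
    let tb := (PySem.List.pyRange 0 n 1).foldl (fun p i =>
      if PySem.Int.band bmask ((1:Int) <<< i.toNat) = 0 then
        (PySem.Int.bxor p.1 (PySem.List.pyGetD nums i 0), pvInsert p.2 (PySem.List.pyGetD nums i 0))
      else p) ((0:Int), List.replicate 32 (0:Int))
    let m := PySem.Int.band (Int.not tb.1) ALL
    let max_and := pvGreedy tb.2 m
    let val := tb.1 + 2 * max_and + and_b
    if val > ans then val else ans) 0

-- ===== PORT B =====
-- recursive subset branching from Source B (same helpers insert/greedy as A's Python, shared above)
def pvRecB (xs : List Int) (and_b : Int) (empty_b : Bool) (tx : Int) (basis : List Int) (ans : Int) : Int :=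
  match xs with
  | [] =>
    let ab : Int := if empty_b then 0 else and_b
    let m := PySem.Int.band (Int.not tx) (((1:Int) <<< 32) - 1)
    let val := tx + 2 * pvGreedy basis m + ab
    if val > ans then val else ans
  | x :: rest =>
    let ans1 := pvRecB rest (if empty_b then x else PySem.Int.band and_b x) false tx basis ans
    pvRecB rest and_b empty_b (PySem.Int.bxor tx x) (pvInsert basis x) ans1

def maximizeXorAndXor_alt (nums : List Int) : Int :=
  pvRecB nums (((1:Int) <<< 32) - 1) true 0 (List.replicate 32 0) 0

-- ===== PRECONDITION & SPEC =====
def Spec_maximizeXorAndXor (nums : List Int) (out : Int) : Prop := out = maximizeXorAndXor_alt nums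
instance (nums : List Int) (out : Int) : Decidable (Spec_maximizeXorAndXor nums out) := by unfold Spec_maximizeXorAndXor; infer_instance

-- ===== CLAIM (what is proved, stated in full; the proofs are below) =====
def Claim_equal_maximizeXorAndXor : Prop := ∀ (nums : List Int), Dom_maximizeXorAndXor nums → Spec_maximizeXorAndXor nums (maximizeXorAndXor nums)

-- ===== LEMMAS AND PROOFS =====

-- proof-layer vocabulary: a subset choice is a vector of (element, chosen-into-B?) pairs;
-- both programs compute pvLeaf of a fold of pvStep over such a vector, and fold pvMax over all vectors.
def pvALL : Int := ((1:Int) <<< 32) - 1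

def pvStepA (p : Int × Bool) (x : Int) : Int × Bool :=
  if p.2 then (x, false) else (PySem.Int.band p.1 x, false)

def pvStepC (p : Int × List Int) (x : Int) : Int × List Int :=
  (PySem.Int.bxor p.1 x, pvInsert p.2 x)

def pvStep (s : (Int × Bool) × (Int × List Int)) (q : Int × Bool) : (Int × Bool) × (Int × List Int) :=
  if q.2 then (pvStepA s.1 q.1, s.2) else (s.1, pvStepC s.2 q.1)

def pvLeaf (s : (Int × Bool) × (Int × List Int)) : Int :=
  s.2.1 + 2 * pvGreedy s.2.2 (PySem.Int.band (Int.not s.2.1) pvALL) + (if s.1.2 then 0 else s.1.1)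

def pvMax (a v : Int) : Int := if v > a then v else a

def pvS0 : (Int × Bool) × (Int × List Int) := ((pvALL, true), (0, List.replicate 32 0))

def pvVec (nums : List Int) (k : Nat) : List (Int × Bool) :=
  nums.zip ((List.range nums.length).map k.testBit)

def pvAllVecs : List Int → List (List (Int × Bool))
  | [] => [[]]
  | x :: xs => (pvAllVecs xs).map ((x, true) :: ·) ++ (pvAllVecs xs).map ((x, false) :: ·)

-- bit-test bridge: Python's `bmask & (1 << j) != 0` is Nat.testBit
theorem pvBitT (k j : Nat) :
    (PySem.Int.band (k:Int) ((1:Int) <<< ((j:Nat):Int)) ≠ 0) ↔ (k.testBit j = true) := by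
  rw [Int.one_shiftLeft, PySem.Int.band_natCast, Nat.and_two_pow]
  cases h : k.testBit j <;> simp

theorem pvBitF (k j : Nat) :
    (PySem.Int.band (k:Int) ((1:Int) <<< ((j:Nat):Int)) = 0) ↔ (k.testBit j = false) := by
  rw [Int.one_shiftLeft, PySem.Int.band_natCast, Nat.and_two_pow]
  cases h : k.testBit j <;> simp

theorem pvIteFlip {α : Sort u_1} (b : Bool) (u v : α) :
    (if b = false then u else v) = if b = true then v else u := by cases b <;> rfl

theorem pvStepA_eq (p : Int × Bool) (x : Int) :
    pvStepA p x = if p.2 then (x, false) else (PySem.Int.band p.1 x, false) := rfl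

theorem pvStepC_eq (p : Int × List Int) (x : Int) :
    pvStepC p x = (PySem.Int.bxor p.1 x, pvInsert p.2 x) := rfl

-- an index loop `for j in range(len(xs))` reading xs[j] and a bit bs j IS a fold over the zipped vector
theorem pvZipFold {S : Type} (G : S → Int → Bool → S) :
    ∀ (xs : List Int) (bs : Nat → Bool) (init : S),
      (List.range xs.length).foldl (fun s j => G s (xs.getD j 0) (bs j)) init
        = (xs.zip ((List.range xs.length).map bs)).foldl (fun s q => G s q.1 q.2) init := by
  intro xs
  induction xs with
  | nil => intro bs init; rfl
  | cons x t ih =>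
    intro bs init
    simp only [List.length_cons, List.range_succ_eq_map, List.map_cons, List.foldl_cons,
      List.map_map, List.foldl_map, List.zip_cons_cons]
    simpa using ih (fun j => bs (j + 1)) (G init x (bs 0))

-- a fold of pvStep splits into its two independent components
theorem pvSplit : ∀ (v : List (Int × Bool)) (a : Int × Bool) (c : Int × List Int),
    List.foldl pvStep (a, c) v
      = (v.foldl (fun p q => if q.2 then pvStepA p q.1 else p) a,
         v.foldl (fun p q => if q.2 then p else pvStepC p q.1) c) := by
  intro v
  induction v with
  | nil => intro a c; rfl
  | cons q t ih =>
    intro a c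
    cases hq : q.2 <;> simp [pvStep, hq, ih]

-- characterisation of PORT A: fold of pvMax over the values of all bitmask vectors
theorem pvAchar (nums : List Int) :
    maximizeXorAndXor nums
      = List.foldl pvMax 0 ((List.range (2 ^ nums.length)).map
          (fun k => pvLeaf (List.foldl pvStep pvS0 (pvVec nums k)))) := by
  unfold maximizeXorAndXor
  rw [show ((1:Int) <<< nums.length) = ((2 ^ nums.length : Nat) : Int) by
        rw [Int.shiftLeft_eq]; push_cast; ring]
  rw [PySem.List.pyRange_zero_natCast, List.foldl_map, List.foldl_map]
  apply PySem.List.foldl_congr_mem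
  intro acc k _
  simp only []
  rw [PySem.List.pyRange_zero_natCast, List.foldl_map, List.foldl_map]
  simp only [Int.toNat_natCast, PySem.List.pyGetD_natCast, pvBitT, pvBitF,
    ← pvStepA_eq, ← pvStepC_eq, pvIteFlip]
  have h1 := pvZipFold (fun s x (b : Bool) => if b then pvStepA s x else s) nums k.testBit
      ((((1:Int) <<< 32) - 1, true) : Int × Bool)
  have h2 := pvZipFold (fun (s : Int × List Int) x (b : Bool) => if b then s else pvStepC s x)
      nums k.testBit (((0:Int), List.replicate 32 (0:Int)))
  simp only [] at h1 h2
  rw [h1, h2]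
  rw [show pvS0 = ((((1:Int) <<< 32) - 1, true), ((0:Int), List.replicate 32 0)) from rfl, pvSplit]
  simp [pvLeaf, pvMax, pvALL, pvVec]

-- characterisation of PORT B: the recursion folds pvMax over the values of all choice vectors
theorem pvBchar : ∀ (xs : List Int) (ab : Int) (e : Bool) (tx : Int) (basis : List Int) (ans : Int),
    pvRecB xs ab e tx basis ans
      = List.foldl pvMax ans ((pvAllVecs xs).map
          (fun v => pvLeaf (List.foldl pvStep ((ab, e), (tx, basis)) v))) := by
  intro xs
  induction xs with
  | nil =>
    intro ab e tx basis ans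
    simp [pvRecB, pvAllVecs, pvLeaf, pvMax, pvALL]
  | cons x t ih =>
    intro ab e tx basis ans
    simp only [pvRecB, pvAllVecs, List.map_append, List.map_map, List.foldl_append]
    rw [ih, ih]
    have hT : pvStep ((ab, e), (tx, basis)) (x, true)
        = ((if e then x else PySem.Int.band ab x, false), (tx, basis)) := by
      cases e <;> simp [pvStep, pvStepA]
    congr 1
    refine congrArg (List.foldl pvMax ans) ?_
    apply List.map_congr_left
    intro v _
    simp only [Function.comp_apply, List.foldl_cons, hT]

-- range(2K) is the odd values then the even values, as a permutation
theorem pvPermRange (K : Nat) :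
    (List.range (2 * K)).Perm
      ((List.range K).map (fun m => 2 * m + 1) ++ (List.range K).map (fun m => 2 * m)) := by
  refine (List.perm_ext_iff_of_nodup (List.nodup_range) ?_).mpr ?_
  · refine List.Nodup.append ?_ ?_ ?_
    · exact List.nodup_range.map (fun a b h => by omega)
    · exact List.nodup_range.map (fun a b h => by omega)
    · intro a ha hb
      simp only [List.mem_map, List.mem_range] at ha hb
      obtain ⟨m, _, rfl⟩ := ha
      obtain ⟨m', _, h⟩ := hb
      omega
  · intro a
    simp only [List.mem_range, List.mem_append, List.mem_map]
    constructor
    · intro h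
      rcases Nat.even_or_odd a with ⟨m, hm⟩ | ⟨m, hm⟩
      · right; exact ⟨m, by omega, by omega⟩
      · left; exact ⟨m, by omega, by omega⟩
    · rintro (⟨m, hm, rfl⟩ | ⟨m, hm, rfl⟩) <;> omega

theorem pvVecCons (x : Int) (t : List Int) (k : Nat) :
    pvVec (x :: t) k = (x, k.testBit 0) :: pvVec t (k / 2) := by
  simp only [pvVec, List.length_cons, List.range_succ_eq_map, List.map_cons, List.map_map,
    List.zip_cons_cons]
  congr 1
  congr 1
  apply List.map_congr_left
  intro j _
  simp [Function.comp, Nat.testBit_add_one]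

-- the bitmask enumeration of vectors is a permutation of B's recursion-tree enumeration
theorem pvPermVecs : ∀ (nums : List Int),
    ((List.range (2 ^ nums.length)).map (pvVec nums)).Perm (pvAllVecs nums) := by
  intro nums
  induction nums with
  | nil => simp [pvAllVecs, pvVec]
  | cons x t ih =>
    have hodd : ∀ m : Nat, pvVec (x :: t) (2 * m + 1) = (x, true) :: pvVec t m := by
      intro m
      rw [pvVecCons]
      have h1 : (2 * m + 1).testBit 0 = true := by simp [Nat.testBit_zero]
      have h2 : (2 * m + 1) / 2 = m := by omega
      rw [h1, h2]
    have heven : ∀ m : Nat, pvVec (x :: t) (2 * m) = (x, false) :: pvVec t m := by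
      intro m
      rw [pvVecCons]
      have h1 : (2 * m).testBit 0 = false := by simp [Nat.testBit_zero]
      have h2 : (2 * m) / 2 = m := by omega
      rw [h1, h2]
    have h0 : (2 : Nat) ^ (x :: t).length = 2 * 2 ^ t.length := by
      simp [List.length_cons, pow_succ]; ring
    rw [h0]
    refine ((pvPermRange (2 ^ t.length)).map (pvVec (x :: t))).trans ?_
    simp only [List.map_append, List.map_map]
    have e1 : (List.range (2 ^ t.length)).map (pvVec (x :: t) ∘ fun m => 2 * m + 1)
        = ((List.range (2 ^ t.length)).map (pvVec t)).map ((x, true) :: ·) := by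
      rw [List.map_map]
      apply List.map_congr_left
      intro m _
      simp [Function.comp, hodd m]
    have e2 : (List.range (2 ^ t.length)).map (pvVec (x :: t) ∘ fun m => 2 * m)
        = ((List.range (2 ^ t.length)).map (pvVec t)).map ((x, false) :: ·) := by
      rw [List.map_map]
      apply List.map_congr_left
      intro m _
      simp [Function.comp, heven m]
    rw [e1, e2]
    show _root_.List.Perm _ ((pvAllVecs t).map ((x, true) :: ·) ++ (pvAllVecs t).map ((x, false) :: ·))
    exact List.Perm.append (ih.map _) (ih.map _)

-- ===== VERDICT (by name: the statement is the Claim_ definition above) =====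
theorem maximizeXorAndXor_spec : Claim_equal_maximizeXorAndXor := by
  intro nums _
  show maximizeXorAndXor nums = maximizeXorAndXor_alt nums
  rw [pvAchar]
  rw [show maximizeXorAndXor_alt nums = pvRecB nums pvALL true 0 (List.replicate 32 0) 0 from rfl]
  rw [pvBchar]
  haveI : RightCommutative pvMax := ⟨by intro b a1 a2; simp only [pvMax]; split_ifs <;> omega⟩
  have hperm := (pvPermVecs nums).map (fun v => pvLeaf (List.foldl pvStep pvS0 v))
  rw [List.map_map] at hperm
  exact hperm.foldl_eq 0
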